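-- pv_equiv track=rewrite | github.com/avyaktrout/Oggy | services/learning/cir/pattern_learning.py | _group_similar_inputs
-- ===== SOURCE A (Python) =====
-- from typing import Dict, List, Optional
--
-- def _group_similar_inputs(violations: List[Dict]) -> Dict[str, List[Dict]]:
--     """
--     Group violations by similar input patterns
--
--     Args:
--         violations: List of violation records
--
--     Returns:
--         Dictionary mapping group key to list of violations
--     """
--     groups = {}
--
--     for violation in violations:
--         user_input = violation.get('user_input', '')
--         if not user_input:
--             continue
--
--         # Normalize input
--         normalized = user_input.lower().strip()
--
--         # Extract key phrases (first few words)
--         words = normalized.split()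
--         if len(words) >= 3:
--             key = ' '.join(words[:3])
--         else:
--             key = normalized
--
--         if key not in groups:
--             groups[key] = []
--         groups[key].append(violation)
--
--     return groups
-- ===== SOURCE B (Python) =====
-- def _group_similar_inputs(violations):
--     # Two-phase: build (key, violation) pairs once, then assemble each group
--     # by filtering the pair list per distinct key (first-occurrence order).
--     pairs = []
--     for violation in violations:
--         user_input = violation.get('user_input', '')
--         if not user_input:
--             continue
--         normalized = user_input.lower().strip()
--         words = normalized.split()
--         key = ' '.join(words[:3]) if len(words) >= 3 else normalized
--         pairs.append((key, violation))
--     keys = list(dict.fromkeys(k for k, _ in pairs))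
--     return {k: [v for k2, v in pairs if k2 == k] for k in keys}
-- ===== Notes on version B (the rewrite author's own statement) =====
-- stated objective: alternative
-- what changed: Replaces the single-pass dict-building loop (check-membership, insert empty list, append) with a two-phase pipeline: build a flat (key, violation) pair list once, dedup the keys in first-occurrence order, then assemble each group by filtering the pair list per key.
import Mathlib
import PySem

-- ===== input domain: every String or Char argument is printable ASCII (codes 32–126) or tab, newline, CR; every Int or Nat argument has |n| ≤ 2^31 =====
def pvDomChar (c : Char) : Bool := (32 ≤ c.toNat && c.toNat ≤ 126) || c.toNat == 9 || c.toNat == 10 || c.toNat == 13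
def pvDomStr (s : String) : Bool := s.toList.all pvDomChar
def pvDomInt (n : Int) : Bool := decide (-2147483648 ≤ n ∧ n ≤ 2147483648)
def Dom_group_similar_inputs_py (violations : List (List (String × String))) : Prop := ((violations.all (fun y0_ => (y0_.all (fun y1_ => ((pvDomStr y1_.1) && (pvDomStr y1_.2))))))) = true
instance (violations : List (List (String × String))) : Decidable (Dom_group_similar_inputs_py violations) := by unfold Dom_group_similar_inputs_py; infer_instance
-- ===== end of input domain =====

-- B builds a flat (key, violation) pair list, dedups the keys, then filters per key,
-- instead of A's incremental dict building; alternative decomposition, same cost class.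

-- ===== PORT A =====
def group_similar_inputs_py (violations : List (List (String × String))) : List (String × List (List (String × String))) :=
  (violations.foldl (fun groups violation =>
    let user_input := (PySem.Dict.ofList violation).getD "user_input" ""
    if user_input == "" then groups
    else
      let normalized := PySem.Str.strip (PySem.Str.lower user_input)
      let words := PySem.Str.split₀ normalized
      let key := if 3 ≤ words.length then PySem.Str.join " " (PySem.List.slice words none (some 3)) else normalized
      let groups1 := if groups.contains key then groups else groups.insert key ([] : List (List (String × String)))
      groups1.insert key (groups1.getD key [] ++ [violation]))
    (PySem.Dict.empty : PySem.Dict String (List (List (String × String))))).items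

-- ===== PORT B =====
def group_similar_inputs_py_alt (violations : List (List (String × String))) : List (String × List (List (String × String))) :=
  let pairs := violations.foldl (fun acc violation =>
    let user_input := (PySem.Dict.ofList violation).getD "user_input" ""
    if user_input == "" then acc
    else
      let normalized := PySem.Str.strip (PySem.Str.lower user_input)
      let words := PySem.Str.split₀ normalized
      let key := if 3 ≤ words.length then PySem.Str.join " " (PySem.List.slice words none (some 3)) else normalized
      acc ++ [(key, violation)]) []
  let keys := PySem.List.dedup (pairs.map (·.1))
  keys.map (fun k => (k, (pairs.filter (fun p => p.1 == k)).map (·.2)))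

-- ===== PRECONDITION & SPEC =====
def Spec_group_similar_inputs_py (violations : List (List (String × String))) (out : List (String × List (List (String × String)))) : Prop := out = group_similar_inputs_py_alt violations
instance (violations : List (List (String × String))) (out : List (String × List (List (String × String)))) : Decidable (Spec_group_similar_inputs_py violations out) := by unfold Spec_group_similar_inputs_py; infer_instance

-- ===== CLAIM (what is proved, stated in full; the proofs are below) =====
def Claim_equal_group_similar_inputs_py : Prop := ∀ (violations : List (List (String × String))), Dom_group_similar_inputs_py violations → Spec_group_similar_inputs_py violations (group_similar_inputs_py violations)

-- ===== LEMMAS AND PROOFS =====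

-- the key a violation is grouped under, none if it is skipped
def pvKey (violation : List (String × String)) : Option String :=
  let user_input := (PySem.Dict.ofList violation).getD "user_input" ""
  if user_input == "" then none
  else
    let normalized := PySem.Str.strip (PySem.Str.lower user_input)
    let words := PySem.Str.split₀ normalized
    some (if 3 ≤ words.length then PySem.Str.join " " (PySem.List.slice words none (some 3)) else normalized)

def pvPairs (violations : List (List (String × String))) : List (String × List (String × String)) :=
  violations.filterMap (fun v => (pvKey v).map (fun k => (k, v)))

-- A's loop body is d.modify key [] (· ++ [v])
theorem pvStep_eq_modify (d : PySem.Dict String (List (List (String × String)))) (k : String) (v : List (String × String)) :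
    ((if d.contains k then d else d.insert k ([] : List (List (String × String)))).insert k
      ((if d.contains k then d else d.insert k ([] : List (List (String × String)))).getD k [] ++ [v]))
     = d.modify k [] (· ++ [v]) := by
  simp only [PySem.Dict.modify]
  by_cases h : d.contains k = true
  · simp [h]
  · simp only [h, if_false, Bool.false_eq_true]
    rw [PySem.Dict.getD_insert_self, PySem.Dict.insert_insert_self,
      PySem.Dict.getD_of_not_contains d [] (by simpa using h)]

theorem pvA_fold_eq (violations : List (List (String × String)))
    (d : PySem.Dict String (List (List (String × String)))) :
    violations.foldl (fun groups violation =>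
      let user_input := (PySem.Dict.ofList violation).getD "user_input" ""
      if user_input == "" then groups
      else
        let normalized := PySem.Str.strip (PySem.Str.lower user_input)
        let words := PySem.Str.split₀ normalized
        let key := if 3 ≤ words.length then PySem.Str.join " " (PySem.List.slice words none (some 3)) else normalized
        let groups1 := if groups.contains key then groups else groups.insert key ([] : List (List (String × String)))
        groups1.insert key (groups1.getD key [] ++ [violation])) d
    = (pvPairs violations).foldl (fun d p => d.modify p.1 [] (· ++ [p.2])) d := by
  induction violations generalizing d with
  | nil => rfl
  | cons v l ih =>
    simp only [List.foldl_cons, pvPairs, List.filterMap_cons, pvKey]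
    by_cases h : ((PySem.Dict.ofList v).getD "user_input" "") == ""
    · simp only [h, if_true, Option.map_none]
      exact ih d
    · simp only [h, if_false, Bool.false_eq_true, Option.map_some, List.foldl_cons]
      rw [pvStep_eq_modify]
      exact ih _

theorem pvB_pairs_eq (violations : List (List (String × String)))
    (acc : List (String × List (String × String))) :
    violations.foldl (fun acc violation =>
      let user_input := (PySem.Dict.ofList violation).getD "user_input" ""
      if user_input == "" then acc
      else
        let normalized := PySem.Str.strip (PySem.Str.lower user_input)
        let words := PySem.Str.split₀ normalized
        let key := if 3 ≤ words.length then PySem.Str.join " " (PySem.List.slice words none (some 3)) else normalized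
        acc ++ [(key, violation)]) acc
    = acc ++ pvPairs violations := by
  induction violations generalizing acc with
  | nil => simp [pvPairs]
  | cons v l ih =>
    simp only [List.foldl_cons, pvPairs, List.filterMap_cons, pvKey]
    by_cases h : ((PySem.Dict.ofList v).getD "user_input" "") == ""
    · simp only [h, if_true, Option.map_none]
      exact ih acc
    · simp only [h, if_false, Bool.false_eq_true, Option.map_some]
      rw [ih]
      simp [pvPairs, pvKey]

-- ===== VERDICT (by name: the statement is the Claim_ definition above) =====
theorem group_similar_inputs_py_spec : Claim_equal_group_similar_inputs_py := by
  intro violations _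
  unfold Spec_group_similar_inputs_py group_similar_inputs_py group_similar_inputs_py_alt
  rw [pvA_fold_eq, pvB_pairs_eq]
  simp only [List.nil_append]
  have hnd := PySem.Dict.nodup_keys_foldl_modify_key (pvPairs violations) Prod.fst
    ([] : List (List (String × String))) (fun _ p => (· ++ [p.2]))
    (PySem.Dict.empty : PySem.Dict String (List (List (String × String))))
    (by simp [PySem.Dict.keys_empty])
  rw [PySem.Dict.items_eq_map_keys _ hnd []]
  rw [PySem.Dict.keys_foldl_modify_key (pvPairs violations) Prod.fst
    ([] : List (List (String × String))) (fun _ p => (· ++ [p.2]))]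
  simp only [PySem.Dict.keys_empty, PySem.Set.update_nil_left, ← PySem.List.dedup_eq_ofList]
  apply List.map_congr_left
  intro k _
  rw [PySem.Dict.getD_foldl_modify_append]
  simp [PySem.Dict.getD_empty]
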